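-- pv_equiv track=rewrite | github.com/Alivanroy/Typosentinel | ml/training/train_models.py | generate_typosquatting_variants
-- ===== SOURCE A (Python) =====
-- from typing import List, Dict, Any, Tuple
--
-- def generate_typosquatting_variants(package_name: str, count: int = 5) -> List[str]:
--     """Generate typosquatting variants of a package name."""
--     variants = []
--
--     # Character substitution
--     substitutions = {
--         'o': '0', '0': 'o', 'i': '1', '1': 'i', 'l': '1',
--         'e': '3', 'a': '@', 's': '$', 'g': '9'
--     }
--
--     for char, replacement in substitutions.items():
--         if char in package_name and len(variants) < count:
--             variant = package_name.replace(char, replacement, 1)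
--             variants.append(variant)
--
--     # Character omission
--     if len(package_name) > 3 and len(variants) < count:
--         for i in range(1, len(package_name) - 1):
--             variant = package_name[:i] + package_name[i+1:]
--             variants.append(variant)
--             if len(variants) >= count:
--                 break
--
--     # Character addition
--     if len(variants) < count:
--         for i in range(len(package_name)):
--             variant = package_name[:i] + package_name[i] + package_name[i:]
--             variants.append(variant)
--             if len(variants) >= count:
--                 break
--
--     # Hyphen/underscore variations
--     if '-' in package_name and len(variants) < count:
--         variants.append(package_name.replace('-', '_'))
--     if '_' in package_name and len(variants) < count:
--         variants.append(package_name.replace('_', '-'))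
--
--     return variants[:count]
-- ===== SOURCE B (Python) =====
-- from typing import List
--
-- def generate_typosquatting_variants(package_name: str, count: int = 5) -> List[str]:
--     """Random-access formulation: compute category sizes, then produce variant k
--     directly from its index for k in range(min(count, total))."""
--     substitutions = {
--         'o': '0', '0': 'o', 'i': '1', '1': 'i', 'l': '1',
--         'e': '3', 'a': '@', 's': '$', 'g': '9'
--     }
--     pairs = [(c, r) for c, r in substitutions.items() if c in package_name]
--     n = len(package_name)
--     ns = len(pairs)
--     no = n - 2 if n > 3 else 0
--     na = n
--     swaps = ([package_name.replace('-', '_')] if '-' in package_name else []) + \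
--             ([package_name.replace('_', '-')] if '_' in package_name else [])
--     total = ns + no + na + len(swaps)
--
--     def variant(k):
--         if k < ns:
--             c, r = pairs[k]
--             j = package_name.index(c)
--             return package_name[:j] + r + package_name[j + 1:]
--         k -= ns
--         if k < no:
--             return package_name[:k + 1] + package_name[k + 2:]
--         k -= no
--         if k < na:
--             return package_name[:k] + package_name[k] + package_name[k:]
--         return swaps[k - na]
--
--     return [variant(k) for k in range(min(count, total))]
-- ===== Notes on version B (the rewrite author's own statement) =====
-- stated objective: alternative
-- what changed: Replaces A's sequential accumulator with per-append count gates and breaks by a random-access formulation: category sizes are computed arithmetically up front and the k-th variant is produced directly from its index k for k in range(min(count, total)), with the substitution built by index-splice at package_name.index(c) instead of str.replace.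
import Mathlib
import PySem

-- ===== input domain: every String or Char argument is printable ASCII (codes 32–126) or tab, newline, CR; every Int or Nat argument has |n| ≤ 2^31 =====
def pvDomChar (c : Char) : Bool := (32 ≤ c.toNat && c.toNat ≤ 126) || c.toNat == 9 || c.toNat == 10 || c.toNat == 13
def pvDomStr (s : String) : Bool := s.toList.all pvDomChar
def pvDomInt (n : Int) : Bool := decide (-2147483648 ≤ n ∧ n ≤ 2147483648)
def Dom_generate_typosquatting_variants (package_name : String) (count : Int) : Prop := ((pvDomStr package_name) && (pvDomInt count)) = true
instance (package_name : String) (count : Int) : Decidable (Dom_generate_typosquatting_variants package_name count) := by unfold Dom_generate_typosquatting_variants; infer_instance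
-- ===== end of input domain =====

-- B replaces A's sequential count-gated accumulator with a random-access formulation:
-- category sizes are computed up front and the k-th variant is produced directly from
-- its index for k in range(min(count, total)); objective: alternative (same cost).


-- the substitutions dict: distinct literal keys, so its items() iterate in this literal order
def pvSubstitutions : List (Char × Char) :=
  [('o', '0'), ('0', 'o'), ('i', '1'), ('1', 'i'), ('l', '1'),
   ('e', '3'), ('a', '@'), ('s', '$'), ('g', '9')]

-- ===== PORT A =====
-- s.replace(c, r, 1) for single characters — replace the first occurrence of c (exact)
def pvReplace1 (cs : List Char) (c r : Char) : List Char :=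
  match cs with
  | [] => []
  | x :: xs => if x = c then r :: xs else x :: pvReplace1 xs c r

-- package_name[:i] + package_name[i+1:]  (omission variant)
def pvOmit (cs : List Char) (i : Int) : List Char :=
  PySem.List.slice cs none (some i) ++ PySem.List.slice cs (some (i + 1)) none

-- package_name[:i] + package_name[i] + package_name[i:]  (addition variant; i from range(len), so
-- pyGetD is exact — the index is always in range)
def pvAddAt (cs : List Char) (i : Int) : List Char :=
  PySem.List.slice cs none (some i) ++ PySem.List.pyGetD cs i ' ' :: PySem.List.slice cs (some i) none

-- 'for i in …: variants.append(f(i));  if len(variants) >= count: break'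
def pvABreakLoop (count : Int) (f : Int → List Char) : List Int → List (List Char) → List (List Char)
  | [], vs => vs
  | i :: rest, vs =>
    let vs' := vs ++ [f i]
    if count ≤ (vs'.length : Int) then vs' else pvABreakLoop count f rest vs'

def generate_typosquatting_variants (package_name : String) (count : Int) : List String :=
  let cs := package_name.toList
  -- character substitution ('a ∈ cs' ports single-character 'char in package_name' exactly)
  let vs : List (List Char) :=
    pvSubstitutions.foldl
      (fun vs p => if p.1 ∈ cs ∧ (vs.length : Int) < count then vs ++ [pvReplace1 cs p.1 p.2] else vs) []
  -- character omission
  let vs := if 3 < cs.length ∧ (vs.length : Int) < count then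
      pvABreakLoop count (pvOmit cs) (PySem.List.pyRange 1 ((cs.length : Int) - 1) 1) vs
    else vs
  -- character addition
  let vs := if (vs.length : Int) < count then
      pvABreakLoop count (pvAddAt cs) (PySem.List.pyRange 0 (cs.length : Int) 1) vs
    else vs
  -- hyphen/underscore variations
  let vs := if '-' ∈ cs ∧ (vs.length : Int) < count then vs ++ [PySem.Chars.replace cs ['-'] ['_']] else vs
  let vs := if '_' ∈ cs ∧ (vs.length : Int) < count then vs ++ [PySem.Chars.replace cs ['_'] ['-']] else vs
  (PySem.List.slice vs none (some count)).map String.mk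

-- ===== PORT B =====
-- B's variant(k): dispatch on the index k against the category sizes.  All slice indices
-- are nonnegative and in range here, so [:i]/[i:]/[i] are List.take/drop/getD exactly;
-- package_name.index(c) is List.idxOf (guarded: c is a key of a pair kept by the filter).
def pvVariantAt (cs : List Char) (pairs : List (Char × Char)) (ns no na : Nat)
    (swaps : List (List Char)) (k : Nat) : List Char :=
  if k < ns then
    let p := pairs.getD k ('o', '0')
    let j := cs.idxOf p.1
    cs.take j ++ p.2 :: cs.drop (j + 1)
  else if k - ns < no then
    cs.take (k - ns + 1) ++ cs.drop (k - ns + 2)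
  else if k - ns - no < na then
    cs.take (k - ns - no) ++ cs.getD (k - ns - no) ' ' :: cs.drop (k - ns - no)
  else
    swaps.getD (k - ns - no - na) []

def generate_typosquatting_variants_alt (package_name : String) (count : Int) : List String :=
  let cs := package_name.toList
  let pairs := pvSubstitutions.filter (fun p => p.1 ∈ cs)
  let ns := pairs.length
  let no := if 3 < cs.length then cs.length - 2 else 0
  let na := cs.length
  let swaps := (if '-' ∈ cs then [PySem.Chars.replace cs ['-'] ['_']] else []) ++
               (if '_' ∈ cs then [PySem.Chars.replace cs ['_'] ['-']] else [])
  let total := ns + no + na + swaps.length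
  -- [variant(k) for k in range(min(count, total))]  (range of a negative int is empty = toNat)
  (List.range (min count (total : Int)).toNat).map
    (fun k => String.mk (pvVariantAt cs pairs ns no na swaps k))

-- ===== PRECONDITION & SPEC =====
def Spec_generate_typosquatting_variants (package_name : String) (count : Int) (out : List String) : Prop := out = generate_typosquatting_variants_alt package_name count
instance (package_name : String) (count : Int) (out : List String) : Decidable (Spec_generate_typosquatting_variants package_name count out) := by unfold Spec_generate_typosquatting_variants; infer_instance

-- ===== CLAIM (what is proved, stated in full; the proofs are below) =====
def Claim_equal_generate_typosquatting_variants : Prop := ∀ (package_name : String) (count : Int), Dom_generate_typosquatting_variants package_name count → Spec_generate_typosquatting_variants package_name count (generate_typosquatting_variants package_name count)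

-- ===== LEMMAS AND PROOFS =====

-- the gated append loop of A's substitution phase builds a prefix of the filtered list
theorem pv_foldl_gate {β : Type} (c : Int) (p : β → Prop) [DecidablePred p] (f : β → List Char) :
    ∀ (items : List β) (vs : List (List Char)),
      items.foldl (fun vs x => if p x ∧ (vs.length : Int) < c then vs ++ [f x] else vs) vs
        = vs ++ (items.filterMap (fun x => if p x then some (f x) else none)).take ((c - vs.length).toNat) := by
  intro items
  induction items with
  | nil => intro vs; simp
  | cons x rest ih =>
    intro vs
    by_cases hp : p x
    · by_cases hl : (vs.length : Int) < c
      · have hcond : p x ∧ ((vs.length : Int) < c) := ⟨hp, hl⟩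
        rw [List.foldl_cons, if_pos hcond, ih]
        simp only [List.filterMap_cons, if_pos hp, List.length_append, List.length_cons,
          List.length_nil]
        have hk : (c - (vs.length : Int)).toNat = (c - ((vs.length : Int) + 1)).toNat + 1 := by
          omega
        rw [hk, List.take_succ_cons]
        push_cast
        rw [List.append_assoc, List.singleton_append]
      · have hk : (c - (vs.length : Int)).toNat = 0 := by omega
        rw [List.foldl_cons, if_neg (by tauto : ¬ (p x ∧ (vs.length : Int) < c)), ih]
        simp only [List.filterMap_cons, if_pos hp]
        rw [hk, List.take_zero]
        simp
    · simp [List.foldl_cons, hp, ih vs]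

-- the append-then-break loop builds a prefix of the full mapped list
theorem pv_breakLoop_spec (c : Int) (f : Int → List Char) :
    ∀ (items : List Int) (vs : List (List Char)), (vs.length : Int) < c →
      pvABreakLoop c f items vs = vs ++ (items.map f).take ((c - vs.length).toNat) := by
  intro items
  induction items with
  | nil => intro vs _; simp [pvABreakLoop]
  | cons i rest ih =>
    intro vs hlt
    simp only [pvABreakLoop, List.length_append, List.length_cons, List.length_nil]
    by_cases h : c ≤ ((vs.length + 1 : Nat) : Int)
    · have hk : (c - (vs.length : Int)).toNat = 1 := by push_cast at h; omega
      rw [if_pos (by push_cast; push_cast at h; omega)]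
      simp [hk]
    · have hlt' : (((vs ++ [f i]).length : Int)) < c := by simp; push_cast at h ⊢; omega
      rw [if_neg (by simpa using h), ih _ hlt']
      simp only [List.length_append, List.length_cons, List.length_nil, List.map_cons]
      have hk : (c - (vs.length : Int)).toNat
          = (c - ((vs.length : Int) + (0 + 1))).toNat + 1 := by push_cast at h; omega
      rw [hk, List.take_succ_cons, List.append_assoc, List.singleton_append]
      push_cast
      rfl

-- appending the next phase's clamped prefix extends the prefix of the concatenation
theorem pv_take_chain {α : Type} (a b : List α) (c : Int) :
    a.take c.toNat ++ b.take ((c - ((a.take c.toNat).length : Int)).toNat) = (a ++ b).take c.toNat := by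
  rw [List.take_append]
  have h : ((c - (((a.take c.toNat).length : Nat) : Int)).toNat) = c.toNat - a.length := by
    rw [List.length_take]; omega
  rw [h]

-- a gated single append is the clamped prefix of the corresponding 0/1-element list
theorem pv_gate_single (c : Int) (q : Prop) [Decidable q] (vs : List (List Char)) (w : List Char) :
    (if q ∧ (vs.length : Int) < c then vs ++ [w] else vs)
      = vs ++ (if q then [w] else []).take ((c - vs.length).toNat) := by
  by_cases hq : q
  · by_cases hl : (vs.length : Int) < c
    · rw [if_pos ⟨hq, hl⟩, if_pos hq, List.take_of_length_le (by simp; omega)]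
    · have h0 : (c - (vs.length : Int)).toNat = 0 := by omega
      rw [if_neg (by tauto : ¬ (q ∧ (vs.length : Int) < c)), if_pos hq, h0, List.take_zero,
        List.append_nil]
  · simp [hq]

-- a guarded filterMap is map-after-filter (stated for the substitution phase's shape)
theorem pv_filterMap_guard (cs : List Char) (l : List (Char × Char)) :
    l.filterMap (fun p => if p.1 ∈ cs then some (pvReplace1 cs p.1 p.2) else none)
      = (l.filter (fun p => p.1 ∈ cs)).map (fun p => pvReplace1 cs p.1 p.2) := by
  induction l with
  | nil => rfl
  | cons a l ih => by_cases h : a.1 ∈ cs <;> simp [h, ih]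

-- replace-first-occurrence is the splice at the first index of c
theorem pvReplace1_eq_splice (cs : List Char) (c r : Char) (h : c ∈ cs) :
    pvReplace1 cs c r = cs.take (cs.idxOf c) ++ r :: cs.drop (cs.idxOf c + 1) := by
  induction cs with
  | nil => cases h
  | cons x xs ih =>
    by_cases hx : x = c
    · subst hx
      simp [pvReplace1, List.idxOf_cons_self]
    · have hm : c ∈ xs := by
        rcases List.mem_cons.mp h with h' | h'
        · exact absurd h'.symm hx
        · exact h'
      simp [pvReplace1, hx, ih hm]

-- slicing a prefix with the same int bound is the prefix itself
theorem pv_slice_take {α : Type} (L : List α) (c : Int) :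
    PySem.List.slice (L.take c.toNat) none (some c) = L.take c.toNat := by
  by_cases hc : 0 ≤ c
  · rw [PySem.List.slice_to _ hc, List.take_take]
    simp
  · have h0 : c.toNat = 0 := by omega
    rw [h0]
    simp [PySem.List.slice]

-- getD through a map, under the length bound
theorem pv_getD_map {α β : Type} (f : α → β) (l : List α) (k : Nat) (d : α) (e : β)
    (h : k < l.length) : (l.map f).getD k e = f (l.getD k d) := by
  induction l generalizing k with
  | nil => cases h
  | cons a l ih =>
    cases k with
    | zero => rfl
    | succ k => simpa using ih k (by simpa using h)

-- random access over range(min c total) is the int-clamped prefix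
theorem pv_range_getD {α : Type} [Inhabited α] (L : List α) (c : Int) (g : Nat → α)
    (hg : ∀ k, k < L.length → g k = L.getD k default) :
    (List.range (min c (L.length : Int)).toNat).map g = L.take c.toNat := by
  apply List.ext_getElem
  · simp [List.length_take]
    omega
  · intro i h1 h2
    simp only [List.length_map, List.length_range] at h1
    have hi : i < L.length := by omega
    rw [List.getElem_map, List.getElem_range, hg i hi, List.getElem_take,
      List.getD_eq_getElem L default hi]

-- ===== VERDICT (by name: the statement is the Claim_ definition above) =====
theorem generate_typosquatting_variants_spec : Claim_equal_generate_typosquatting_variants := by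
  intro package_name count _
  unfold Spec_generate_typosquatting_variants
  unfold generate_typosquatting_variants generate_typosquatting_variants_alt
  set cs := package_name.toList with hcs
  set c := count with hc
  set pairs : List (Char × Char) := pvSubstitutions.filter (fun p => p.1 ∈ cs) with hpairs
  set L1 : List (List Char) :=
    pvSubstitutions.filterMap (fun p => if p.1 ∈ cs then some (pvReplace1 cs p.1 p.2) else none) with hL1
  set L2 : List (List Char) :=
    (if 3 < cs.length then (PySem.List.pyRange 1 ((cs.length : Int) - 1) 1).map (pvOmit cs) else []) with hL2
  set L3 : List (List Char) := (PySem.List.pyRange 0 (cs.length : Int) 1).map (pvAddAt cs) with hL3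
  set L4a : List (List Char) := (if '-' ∈ cs then [PySem.Chars.replace cs ['-'] ['_']] else []) with hL4a
  set L4b : List (List Char) := (if '_' ∈ cs then [PySem.Chars.replace cs ['_'] ['-']] else []) with hL4b
  -- ---- A's value is the c-prefix of the concatenation ----
  have h1 : pvSubstitutions.foldl
      (fun vs p => if p.1 ∈ cs ∧ (vs.length : Int) < c then vs ++ [pvReplace1 cs p.1 p.2] else vs) []
      = L1.take c.toNat := by
    rw [pv_foldl_gate c (fun p => p.1 ∈ cs) (fun p => pvReplace1 cs p.1 p.2) pvSubstitutions []]
    simp only [List.nil_append, List.length_nil, Nat.cast_zero, sub_zero]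
    rfl
  set v1 : List (List Char) := L1.take c.toNat with hv1
  have h2 : (if 3 < cs.length ∧ (v1.length : Int) < c then
        pvABreakLoop c (pvOmit cs) (PySem.List.pyRange 1 ((cs.length : Int) - 1) 1) v1 else v1)
      = (L1 ++ L2).take c.toNat := by
    rw [← pv_take_chain L1 L2 c, ← hv1]
    by_cases hg : 3 < cs.length
    · by_cases hl : (v1.length : Int) < c
      · rw [if_pos ⟨hg, hl⟩, pv_breakLoop_spec c (pvOmit cs) _ v1 hl, hL2, if_pos hg]
      · have : (c - (v1.length : Int)).toNat = 0 := by omega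
        rw [if_neg (by tauto)]
        simp [this]
    · rw [if_neg (by tauto), hL2, if_neg hg]
      simp
  set v2 : List (List Char) := (L1 ++ L2).take c.toNat with hv2
  have h3 : (if (v2.length : Int) < c then
        pvABreakLoop c (pvAddAt cs) (PySem.List.pyRange 0 (cs.length : Int) 1) v2 else v2)
      = (L1 ++ L2 ++ L3).take c.toNat := by
    rw [← pv_take_chain (L1 ++ L2) L3 c, ← hv2]
    by_cases hl : (v2.length : Int) < c
    · rw [if_pos hl, pv_breakLoop_spec c (pvAddAt cs) _ v2 hl, hL3]
    · have : (c - (v2.length : Int)).toNat = 0 := by omega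
      rw [if_neg hl]
      simp [this]
  set v3 : List (List Char) := (L1 ++ L2 ++ L3).take c.toNat with hv3
  have h4 : (if '-' ∈ cs ∧ (v3.length : Int) < c then v3 ++ [PySem.Chars.replace cs ['-'] ['_']] else v3)
      = (L1 ++ L2 ++ L3 ++ L4a).take c.toNat := by
    rw [← pv_take_chain (L1 ++ L2 ++ L3) L4a c, ← hv3, pv_gate_single c ('-' ∈ cs) v3, hL4a]
  set v4 : List (List Char) := (L1 ++ L2 ++ L3 ++ L4a).take c.toNat with hv4
  have h5 : (if '_' ∈ cs ∧ (v4.length : Int) < c then v4 ++ [PySem.Chars.replace cs ['_'] ['-']] else v4)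
      = (L1 ++ L2 ++ L3 ++ L4a ++ L4b).take c.toNat := by
    rw [← pv_take_chain (L1 ++ L2 ++ L3 ++ L4a) L4b c, ← hv4, pv_gate_single c ('_' ∈ cs) v4, hL4b]
  simp only [h1, ← hv1, h2, ← hv2, h3, h4, h5]
  set Big : List (List Char) := L1 ++ L2 ++ L3 ++ L4a ++ L4b with hBig
  rw [pv_slice_take Big c]
  -- ---- B's value is the same prefix, by random access ----
  set nOmit := (if 3 < cs.length then cs.length - 2 else 0) with hnOmit
  have hlen1 : L1.length = pairs.length := by
    rw [hL1, pv_filterMap_guard cs pvSubstitutions, ← hpairs, List.length_map]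
  have hlen2 : L2.length = nOmit := by
    rw [hL2, hnOmit]
    by_cases hg : 3 < cs.length
    · rw [if_pos hg, if_pos hg, List.length_map, PySem.List.length_pyRange_one]
      omega
    · rw [if_neg hg, if_neg hg]
      rfl
  have hlen3 : L3.length = cs.length := by
    rw [hL3, List.length_map, PySem.List.length_pyRange_one]
    omega
  have hL1map : L1 = pairs.map (fun p => pvReplace1 cs p.1 p.2) := by
    rw [hL1, pv_filterMap_guard cs pvSubstitutions, hpairs]
  have htotInt : ((pairs.length + nOmit + cs.length + (L4a ++ L4b).length : Nat) : Int)
      = (Big.length : Int) := by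
    have h : Big.length = pairs.length + nOmit + cs.length + (L4a ++ L4b).length := by
      simp only [hBig, List.length_append, hlen1, hlen2, hlen3]
      omega
    rw [h]
  -- the k-th element of Big is B's variant(k)
  have hvar : ∀ k, k < Big.length →
      pvVariantAt cs pairs pairs.length nOmit cs.length (L4a ++ L4b) k = Big.getD k [] := by
    intro k hk
    have hk' : k < L1.length + (L2.length + (L3.length + (L4a.length + L4b.length))) := by
      simp only [hBig, List.length_append] at hk
      omega
    unfold pvVariantAt
    by_cases hk1 : k < pairs.length
    · rw [if_pos hk1]
      have hBigk : Big.getD k [] = L1.getD k [] := by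
        rw [hBig, List.getD_append _ _ _ _ (by simp only [List.length_append]; omega),
          List.getD_append _ _ _ _ (by simp only [List.length_append]; omega),
          List.getD_append _ _ _ _ (by simp only [List.length_append]; omega),
          List.getD_append _ _ _ _ (by omega)]
      rw [hBigk, hL1map, pv_getD_map (fun p => pvReplace1 cs p.1 p.2) pairs k ('o', '0') [] hk1]
      have hpm : pairs.getD k ('o', '0') ∈ pairs := by
        rw [List.getD_eq_getElem _ _ hk1]
        exact List.getElem_mem hk1
      have hpc : (pairs.getD k ('o', '0')).1 ∈ cs := by
        have := List.of_mem_filter (hpairs ▸ hpm)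
        simpa using this
      rw [pvReplace1_eq_splice cs _ _ hpc]
    · rw [if_neg hk1]
      by_cases hk2 : k - pairs.length < nOmit
      · rw [if_pos hk2]
        have hg : 3 < cs.length := by
          by_contra hgn
          rw [hnOmit, if_neg hgn] at hk2
          omega
        have hBigk : Big.getD k [] = L2.getD (k - pairs.length) [] := by
          rw [hBig, List.getD_append _ _ _ _ (by simp only [List.length_append]; omega),
            List.getD_append _ _ _ _ (by simp only [List.length_append]; omega),
            List.getD_append _ _ _ _ (by simp only [List.length_append]; omega),
            List.getD_append_right _ _ _ _ (by omega), hlen1]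
        rw [hBigk, show L2 = (PySem.List.pyRange 1 ((cs.length : Int) - 1) 1).map (pvOmit cs) from
          by rw [hL2, if_pos hg]]
        have hjr : k - pairs.length < (PySem.List.pyRange 1 ((cs.length : Int) - 1) 1).length := by
          rw [PySem.List.length_pyRange_one]
          rw [hnOmit, if_pos hg] at hk2
          omega
        rw [pv_getD_map (pvOmit cs) _ (k - pairs.length) (0 : Int) [] hjr]
        have hval : (PySem.List.pyRange 1 ((cs.length : Int) - 1) 1).getD (k - pairs.length) (0 : Int)
            = ((k - pairs.length + 1 : Nat) : Int) := by
          rw [List.getD_eq_getElem _ _ hjr, PySem.List.getElem_pyRange_one]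
          push_cast
          ring
        rw [hval]
        unfold pvOmit
        rw [PySem.List.slice_to_natCast,
          show ((k - pairs.length + 1 : Nat) : Int) + 1 = ((k - pairs.length + 2 : Nat) : Int) from
            by push_cast; ring,
          PySem.List.slice_from_natCast]
      · rw [if_neg hk2]
        by_cases hk3 : k - pairs.length - nOmit < cs.length
        · rw [if_pos hk3]
          have hBigk : Big.getD k [] = L3.getD (k - pairs.length - nOmit) [] := by
            have hidx : k - (L1 ++ L2).length = k - pairs.length - nOmit := by
              simp only [List.length_append]
              omega
            rw [hBig, List.getD_append _ _ _ _ (by simp only [List.length_append]; omega),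
              List.getD_append _ _ _ _ (by simp only [List.length_append]; omega),
              List.getD_append_right _ _ _ _ (by simp only [List.length_append]; omega), hidx]
          rw [hBigk, hL3]
          have hjr : k - pairs.length - nOmit < (PySem.List.pyRange 0 (cs.length : Int) 1).length := by
            rw [PySem.List.length_pyRange_one]
            omega
          rw [pv_getD_map (pvAddAt cs) _ (k - pairs.length - nOmit) (0 : Int) [] hjr]
          have hval : (PySem.List.pyRange 0 (cs.length : Int) 1).getD (k - pairs.length - nOmit) (0 : Int)
              = ((k - pairs.length - nOmit : Nat) : Int) := by
            rw [List.getD_eq_getElem _ _ hjr, PySem.List.getElem_pyRange_one]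
            ring
          rw [hval]
          unfold pvAddAt
          rw [PySem.List.slice_to_natCast, PySem.List.slice_from_natCast,
            PySem.List.pyGetD_natCast]
        · rw [if_neg hk3]
          have hBigk : Big.getD k [] = (L4a ++ L4b).getD (k - pairs.length - nOmit - cs.length) [] := by
            have hBig2 : Big = (L1 ++ L2 ++ L3) ++ (L4a ++ L4b) := by
              rw [hBig, List.append_assoc]
            have hidx : k - (L1 ++ L2 ++ L3).length = k - pairs.length - nOmit - cs.length := by
              simp only [List.length_append]
              omega
            rw [hBig2, List.getD_append_right _ _ _ _ (by simp only [List.length_append]; omega), hidx]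
          rw [hBigk]
  -- assemble B's range map into the same prefix
  have hB : (List.range (min c ((pairs.length + nOmit + cs.length + (L4a ++ L4b).length : Nat) : Int)).toNat).map
      (fun k => String.mk (pvVariantAt cs pairs pairs.length nOmit cs.length (L4a ++ L4b) k))
      = (Big.take c.toNat).map String.mk := by
    rw [htotInt,
      show (fun k => String.mk (pvVariantAt cs pairs pairs.length nOmit cs.length (L4a ++ L4b) k))
        = String.mk ∘ (fun k => pvVariantAt cs pairs pairs.length nOmit cs.length (L4a ++ L4b) k)
        from rfl,
      ← List.map_map, pv_range_getD Big c _ hvar]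
  exact hB.symm
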